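-- pv_equiv track=rewrite | github.com/alexpetrovan2001/LeetCodeProblems | Array/Medium/MaximumProductSubarray.py | returnMultipleArrays
-- ===== SOURCE A (Python) =====
-- from typing import List
--
-- def returnMultipleArrays(nums: List[int]) -> List[List[int]]:
--     negIndexes = 0
--     nonZeroArrays = []
--     i = 0
--     arrayToVerify = []
--     while i < len(nums):
--         if nums[i] == 0:
--             if arrayToVerify:
--                 arrayToVerify.append(negIndexes)
--                 nonZeroArrays.append(arrayToVerify)
--                 arrayToVerify=[]
--                 negIndexes=0
--         else:
--             if nums[i]<0:
--                 negIndexes+=1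
--             arrayToVerify.append(nums[i])
--         i+=1
--     if arrayToVerify:
--         arrayToVerify.append(negIndexes)
--         nonZeroArrays.append(arrayToVerify)
--     return nonZeroArrays
-- ===== SOURCE B (Python) =====
-- def returnMultipleArrays(nums):
--     # Cut positions: virtual -1, every index holding a zero, and len(nums).
--     cuts = [-1] + [i for i, x in enumerate(nums) if x == 0] + [len(nums)]
--     out = []
--     for a, b in zip(cuts, cuts[1:]):
--         if b - a > 1:
--             seg = nums[a + 1:b]
--             out.append(seg + [len([v for v in seg if v < 0])])
--     return out
-- ===== Notes on version B (the rewrite author's own statement) =====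
-- stated objective: alternative
-- what changed: B computes the list of cut positions (zero indices plus virtual sentinels -1 and len) in one comprehension and then extracts each segment by slicing between adjacent cuts, instead of A's element-at-a-time accumulator loop with an interleaved negative counter.
import Mathlib
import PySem

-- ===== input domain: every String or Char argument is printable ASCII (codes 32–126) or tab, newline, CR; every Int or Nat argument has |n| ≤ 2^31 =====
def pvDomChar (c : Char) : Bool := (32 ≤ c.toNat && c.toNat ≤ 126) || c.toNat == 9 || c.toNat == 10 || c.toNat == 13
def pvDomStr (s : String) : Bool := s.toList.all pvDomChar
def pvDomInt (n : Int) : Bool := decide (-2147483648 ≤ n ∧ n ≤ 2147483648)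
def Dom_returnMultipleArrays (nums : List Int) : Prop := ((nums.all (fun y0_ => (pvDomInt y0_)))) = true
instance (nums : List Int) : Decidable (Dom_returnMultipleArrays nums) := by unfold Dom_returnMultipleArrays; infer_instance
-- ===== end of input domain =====

-- B computes the zero cut positions first and slices the segments out between adjacent cuts (alternative decomposition, same asymptotic cost as A).


-- ===== PORT A =====
-- A's single while-loop with state (negIndexes, nonZeroArrays, arrayToVerify), final flush.
def aLoop : List Int → Int → List (List Int) → List Int → List (List Int)
  | [], negIndexes, nonZeroArrays, arrayToVerify =>
      if arrayToVerify ≠ [] then nonZeroArrays ++ [arrayToVerify ++ [negIndexes]] else nonZeroArrays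
  | x :: rest, negIndexes, nonZeroArrays, arrayToVerify =>
      if x = 0 then
        if arrayToVerify ≠ [] then aLoop rest 0 (nonZeroArrays ++ [arrayToVerify ++ [negIndexes]]) []
        else aLoop rest negIndexes nonZeroArrays arrayToVerify
      else
        aLoop rest (if x < 0 then negIndexes + 1 else negIndexes) nonZeroArrays (arrayToVerify ++ [x])

def returnMultipleArrays (nums : List Int) : List (List Int) := aLoop nums 0 [] []

-- ===== PORT B =====
-- cuts = [-1] + [i for i, x in enumerate(nums) if x == 0] + [len(nums)]
def zeroCuts (nums : List Int) : List Int :=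
  [-1] ++ ((PySem.List.enumerate nums).filter (fun p => p.2 == 0)).map (fun p => p.1)
       ++ [(nums.length : Int)]

-- seg = nums[a+1:b]; seg + [len([v for v in seg if v < 0])]
def segOut (nums : List Int) (a b : Int) : List Int :=
  let seg := PySem.List.slice nums (some (a + 1)) (some b)
  seg ++ [((seg.filter (fun v => v < 0)).length : Int)]

def returnMultipleArrays_alt (nums : List Int) : List (List Int) :=
  ((zeroCuts nums).zip (zeroCuts nums).tail).foldl
    (fun out p => if p.2 - p.1 > 1 then out ++ [segOut nums p.1 p.2] else out) []

-- ===== PRECONDITION & SPEC =====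
def Spec_returnMultipleArrays (nums : List Int) (out : List (List Int)) : Prop := out = returnMultipleArrays_alt nums
instance (nums : List Int) (out : List (List Int)) : Decidable (Spec_returnMultipleArrays nums out) := by unfold Spec_returnMultipleArrays; infer_instance

-- ===== CLAIM (what is proved, stated in full; the proofs are below) =====
def Claim_equal_returnMultipleArrays : Prop := ∀ (nums : List Int), Dom_returnMultipleArrays nums → Spec_returnMultipleArrays nums (returnMultipleArrays nums)

-- ===== LEMMAS AND PROOFS =====

-- Reference splitter (proof helper only): maximal nonzero runs.
def bSplit : List Int → List Int → List (List Int)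
  | [], cur => if cur ≠ [] then [cur] else []
  | x :: rest, cur =>
      if x = 0 then
        if cur ≠ [] then cur :: bSplit rest [] else bSplit rest cur
      else bSplit rest (cur ++ [x])

def negCount (g : List Int) : Int := ((g.filter (fun v => v < 0)).length : Int)

def fseg (g : List Int) : List Int := g ++ [negCount g]

-- A equals the reference splitter (invariant of A's loop).
theorem negCount_append_neg (cur : List Int) (x : Int) (hx : x < 0) :
    negCount (cur ++ [x]) = negCount cur + 1 := by
  simp [negCount, List.filter_append, hx]

theorem negCount_append_nonneg (cur : List Int) (x : Int) (hx : ¬ x < 0) :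
    negCount (cur ++ [x]) = negCount cur := by
  simp [negCount, List.filter_append, hx]

theorem aLoop_eq (rest : List Int) :
    ∀ (cur : List Int) (acc : List (List Int)),
      aLoop rest (negCount cur) acc cur = acc ++ (bSplit rest cur).map fseg := by
  induction rest with
  | nil =>
      intro cur acc
      by_cases h : cur = [] <;> simp [aLoop, bSplit, h, fseg]
  | cons x rest ih =>
      intro cur acc
      by_cases hx : x = 0
      · by_cases h : cur = []
        · simp [aLoop, bSplit, hx, h, ih]
        · have h0 : negCount ([] : List Int) = 0 := by simp [negCount]
          simp [aLoop, bSplit, hx, h, fseg]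
          rw [← h0, ih [] (acc ++ [cur ++ [negCount cur]])]
          simp
      · by_cases hneg : x < 0
        · simp only [aLoop, bSplit, if_neg hx, if_pos hneg]
          rw [← negCount_append_neg cur x hneg, ih]
        · simp only [aLoop, bSplit, if_neg hx, if_neg hneg]
          rw [← negCount_append_nonneg cur x hneg, ih]

-- Recursive characterisation of the zero-index comprehension.
def zI : List Int → Int → List Int
  | [], _ => []
  | x :: r, s => if x == 0 then s :: zI r (s + 1) else zI r (s + 1)

theorem enumFilter_eq_zI (xs : List Int) :
    ∀ s : Int, ((PySem.List.enumerate xs s).filter (fun p => p.2 == 0)).map (fun p => p.1) = zI xs s := by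
  induction xs with
  | nil => intro s; simp [PySem.List.enumerate_nil, zI]
  | cons x r ih =>
      intro s
      by_cases hx : x = 0 <;>
        simp [PySem.List.enumerate_cons, zI, hx, ih]

theorem zI_shift (xs : List Int) :
    ∀ s d : Int, zI xs (s + d) = (zI xs s).map (· + d) := by
  induction xs with
  | nil => intro s d; simp [zI]
  | cons x r ih =>
      intro s d
      by_cases hx : x = 0 <;>
        simp [zI, hx, ← ih, add_right_comm s d 1]

theorem zI_nozero (xs : List Int) (h : ∀ x ∈ xs, x ≠ 0) : ∀ s, zI xs s = [] := by
  induction xs with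
  | nil => intro s; simp [zI]
  | cons x r ih =>
      intro s
      have hx : x ≠ 0 := h x (by simp)
      simp [zI, hx, ih (fun y hy => h y (by simp [hy]))]

theorem zI_bounds (xs : List Int) :
    ∀ s c, c ∈ zI xs s → s ≤ c ∧ c < s + xs.length := by
  induction xs with
  | nil => intro s c hc; simp [zI] at hc
  | cons x r ih =>
      intro s c hc
      have hlen : ((x :: r).length : Int) = (r.length : Int) + 1 := by simp
      by_cases hx : x = 0 <;> simp [zI, hx] at hc
      · rcases hc with rfl | hc
        · omega
        · have := ih (s + 1) c hc; omega
      · have := ih (s + 1) c hc; omega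

-- zeroCuts through zI.
theorem zeroCuts_eq (nums : List Int) :
    zeroCuts nums = -1 :: (zI nums 0 ++ [(nums.length : Int)]) := by
  simp [zeroCuts, enumFilter_eq_zI]

-- Element bounds of zeroCuts.
theorem zeroCuts_mem_bounds (nums : List Int) (c : Int) (hc : c ∈ zeroCuts nums) :
    -1 ≤ c ∧ c ≤ (nums.length : Int) := by
  rw [zeroCuts_eq] at hc
  have h0 : (0 : Int) ≤ (nums.length : Int) := Int.natCast_nonneg _
  simp at hc
  rcases hc with rfl | hc | rfl
  · omega
  · have := zI_bounds nums 0 c hc; omega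
  · omega

theorem zeroCuts_tail_mem_bounds (nums : List Int) (c : Int) (hc : c ∈ (zeroCuts nums).tail) :
    0 ≤ c ∧ c ≤ (nums.length : Int) := by
  rw [zeroCuts_eq] at hc
  have h0 : (0 : Int) ≤ (nums.length : Int) := Int.natCast_nonneg _
  simp at hc
  rcases hc with hc | rfl
  · have := zI_bounds nums 0 c hc; omega
  · omega

-- The fold is a filter-map over the adjacent-pair list.
theorem foldlSeg (nums : List Int) (l : List (Int × Int)) :
    ∀ acc : List (List Int),
      l.foldl (fun out p => if p.2 - p.1 > 1 then out ++ [segOut nums p.1 p.2] else out) acc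
        = acc ++ (l.filter (fun p => decide (p.2 - p.1 > 1))).map (fun p => segOut nums p.1 p.2) := by
  induction l with
  | nil => intro acc; simp
  | cons p l ih =>
      intro acc
      by_cases hp : p.2 - p.1 > 1 <;> simp [List.foldl_cons, hp, ih]

-- The splitter across a nonzero prefix followed by a zero.
theorem bSplit_pre (pre : List Int) :
    ∀ (cur suf : List Int), (∀ x ∈ pre, x ≠ 0) →
      bSplit (pre ++ 0 :: suf) cur
        = (if cur ++ pre ≠ [] then [cur ++ pre] else []) ++ bSplit suf [] := by
  induction pre with
  | nil =>
      intro cur suf _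
      by_cases h : cur = [] <;> simp [bSplit, h]
  | cons x pre ih =>
      intro cur suf h
      have hx : x ≠ 0 := h x (by simp)
      simp only [List.cons_append, bSplit, if_neg hx]
      rw [ih (cur ++ [x]) suf (fun y hy => h y (by simp [hy]))]
      simp

theorem bSplit_nozero (xs : List Int) :
    ∀ cur, (∀ x ∈ xs, x ≠ 0) → bSplit xs cur = if cur ++ xs ≠ [] then [cur ++ xs] else [] := by
  induction xs with
  | nil => intro cur _; simp [bSplit]
  | cons x r ih =>
      intro cur h
      have hx : x ≠ 0 := h x (by simp)
      simp only [bSplit, if_neg hx]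
      rw [ih (cur ++ [x]) (fun y hy => h y (by simp [hy]))]
      simp

-- Any list containing 0 splits as a zero-free prefix, the first zero, and a suffix.
theorem exists_split (nums : List Int) (h : (0 : Int) ∈ nums) :
    ∃ pre suf, nums = pre ++ 0 :: suf ∧ ∀ x ∈ pre, x ≠ 0 := by
  induction nums with
  | nil => simp at h
  | cons y r ih =>
      by_cases hy : y = 0
      · exact ⟨[], r, by simp [hy], by simp⟩
      · have hr : (0 : Int) ∈ r := by
          rcases List.mem_cons.mp h with h1 | h1
          · exact absurd h1.symm hy
          · exact h1
        obtain ⟨p, s, hd, hp⟩ := ih hr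
        exact ⟨y :: p, s, by simp [hd], by
          intro x hx
          rcases List.mem_cons.mp hx with rfl | hx
          · exact hy
          · exact hp x hx⟩

-- zip of two equally shifted lists.
theorem zip_map_shift (l1 l2 : List Int) (c : Int) :
    (l1.map (· + c)).zip (l2.map (· + c)) = (l1.zip l2).map (fun p => (p.1 + c, p.2 + c)) := by
  rw [List.zip_map]
  rfl

-- Slices of nums shifted past the leading "pre ++ [0]" block are slices of suf.
theorem segOut_shift (pre suf : List Int) (a b : Int)
    (ha : -1 ≤ a) (hb : 0 ≤ b) :
    segOut (pre ++ 0 :: suf) (a + ((pre.length : Int) + 1)) (b + ((pre.length : Int) + 1))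
      = segOut suf a b := by
  have key : PySem.List.slice (pre ++ 0 :: suf)
      (some (a + ((pre.length : Int) + 1) + 1)) (some (b + ((pre.length : Int) + 1)))
      = PySem.List.slice suf (some (a + 1)) (some b) := by
    rw [PySem.List.slice_toNat, PySem.List.slice_toNat]
    · have hd : (pre ++ 0 :: suf).drop ((a + ((pre.length : Int) + 1) + 1).toNat)
          = suf.drop ((a + 1).toNat) := by
        have h1 : (a + ((pre.length : Int) + 1) + 1).toNat
            = (pre ++ [(0 : Int)]).length + (a + 1).toNat := by
          simp; omega
        have h2 : pre ++ 0 :: suf = (pre ++ [(0 : Int)]) ++ suf := by simp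
        rw [h1, h2, List.drop_append]
        have e1 : (pre ++ [(0 : Int)]).length + (a + 1).toNat - (pre ++ [(0 : Int)]).length
            = (a + 1).toNat := by omega
        have e2 : List.drop ((pre ++ [(0 : Int)]).length + (a + 1).toNat) (pre ++ [(0 : Int)])
            = [] := List.drop_eq_nil_of_le (by omega)
        rw [e1, e2]
        simp
      rw [hd]
      congr 1
      omega
    all_goals omega
  simp only [segOut, key]

-- Main lemma: B's filtered pair extraction equals the reference splitter.
theorem main_eq (n : Nat) : ∀ (nums : List Int), nums.length = n →
    (((zeroCuts nums).zip (zeroCuts nums).tail).filter (fun p => decide (p.2 - p.1 > 1))).map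
        (fun p => segOut nums p.1 p.2)
      = (bSplit nums []).map fseg := by
  induction n using Nat.strong_induction_on with
  | _ n ih =>
      intro nums hlen
      by_cases hz : (0 : Int) ∈ nums
      · obtain ⟨pre, suf, hdecomp, hprenz⟩ := exists_split nums hz
        subst hdecomp
        set k : Int := (pre.length : Int) with hk
        have hkn : (0 : Int) ≤ k := Int.natCast_nonneg _
        have hlennums : (((pre ++ 0 :: suf)).length : Int) = (suf.length : Int) + (k + 1) := by
          simp [hk]; ring
        set M0 : List Int := zI suf 0 ++ [(suf.length : Int)] with hM0def
        have hM0 : zeroCuts suf = -1 :: M0 := zeroCuts_eq suf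
        -- cuts of nums = -1 :: (cuts of suf) shifted by k+1
        have hcuts : zeroCuts (pre ++ 0 :: suf)
            = -1 :: (zeroCuts suf).map (· + (k + 1)) := by
          rw [zeroCuts_eq, hM0]
          have hzIn : zI (pre ++ 0 :: suf) 0 = k :: zI suf (k + 1) := by
            have hgen : ∀ (p : List Int) (s : Int), (∀ x ∈ p, x ≠ 0) →
                zI (p ++ 0 :: suf) s = (s + (p.length : Int)) :: zI suf (s + (p.length : Int) + 1) := by
              intro p
              induction p with
              | nil => intro s _; simp [zI]
              | cons y p ihp =>
                  intro s hp
                  have hy : y ≠ 0 := hp y (by simp)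
                  simp only [List.cons_append, zI, beq_iff_eq, if_neg hy]
                  rw [ihp (s + 1) (fun z hzz => hp z (by simp [hzz]))]
                  have hc : (s + 1) + ((p.length : Int)) = s + (((y :: p).length : Int)) := by
                    simp only [List.length_cons]; push_cast; ring
                  rw [hc]
            have := hgen pre 0 hprenz
            simpa [hk] using this
          have hshift : zI suf (k + 1) = (zI suf 0).map (· + (k + 1)) := by
            have := zI_shift suf 0 (k + 1)
            simpa using this
          rw [hzIn, hlennums, hshift]
          simp only [hM0def, List.map_cons, List.map_append, List.map_nil, List.cons_append]
          have hm1 : (-1 : Int) + (k + 1) = k := by ring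
          rw [hm1]
        have hpairs :
            ((zeroCuts (pre ++ 0 :: suf)).zip (zeroCuts (pre ++ 0 :: suf)).tail)
              = (-1, k) :: ((zeroCuts suf).zip (zeroCuts suf).tail).map
                  (fun p => (p.1 + (k + 1), p.2 + (k + 1))) := by
          rw [hcuts, hM0]
          simp only [List.map_cons, List.tail_cons, List.zip_cons_cons]
          congr 1
          · have hm1 : (-1 : Int) + (k + 1) = k := by ring
            rw [hm1]
          · have hh : ((-1 : Int) + (k + 1)) :: (M0.map (· + (k + 1)))
                = ((-1) :: M0).map (· + (k + 1)) := by simp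
            rw [hh, zip_map_shift]
        rw [hpairs]
        have hprelen : 0 < pre.length ↔ pre ≠ [] := List.length_pos_iff
        have hfilter_shift :
            (((zeroCuts suf).zip (zeroCuts suf).tail).map
                (fun p => (p.1 + (k + 1), p.2 + (k + 1)))).filter (fun p => decide (p.2 - p.1 > 1))
              = (((zeroCuts suf).zip (zeroCuts suf).tail).filter
                  (fun p => decide (p.2 - p.1 > 1))).map
                    (fun p => (p.1 + (k + 1), p.2 + (k + 1))) := by
          rw [List.filter_map]
          congr 1
          apply List.filter_congr
          intro p _
          simp only [Function.comp_apply, decide_eq_decide]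
          omega
        have hsegmap :
            ∀ p ∈ ((zeroCuts suf).zip (zeroCuts suf).tail).filter (fun p => decide (p.2 - p.1 > 1)),
              segOut (pre ++ 0 :: suf) (p.1 + (k + 1)) (p.2 + (k + 1)) = segOut suf p.1 p.2 := by
          intro p hp
          have hpz := List.mem_of_mem_filter hp
          have h1 := (List.of_mem_zip hpz).1
          have h2 := (List.of_mem_zip hpz).2
          have hb1 := zeroCuts_mem_bounds suf p.1 h1
          have hb2 := zeroCuts_tail_mem_bounds suf p.2 h2
          exact segOut_shift pre suf p.1 p.2 hb1.1 hb2.1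
        have hIH : (((zeroCuts suf).zip (zeroCuts suf).tail).filter
              (fun p => decide (p.2 - p.1 > 1))).map (fun p => segOut suf p.1 p.2)
            = (bSplit suf []).map fseg := by
          apply ih suf.length _ suf rfl
          rw [← hlen]
          simp
          omega
        have hbs : bSplit (pre ++ 0 :: suf) []
            = (if pre ≠ [] then [pre] else []) ++ bSplit suf [] := by
          rw [bSplit_pre pre [] suf hprenz]
          simp
        rw [hbs]
        by_cases hpe : pre = []
        · simp only [List.filter_cons]
          have hnc : ¬ ((k : Int) - (-1) > 1) := by
            rw [hpe] at hk
            simp at hk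
            omega
          rw [if_neg (by simpa using hnc)]
          rw [hfilter_shift, List.map_map]
          have hmc := List.map_congr_left
            (f := (fun p => segOut (pre ++ 0 :: suf) p.1 p.2) ∘ (fun p => (p.1 + (k + 1), p.2 + (k + 1))))
            (g := fun p => segOut suf p.1 p.2)
            (l := ((zeroCuts suf).zip (zeroCuts suf).tail).filter (fun p => decide (p.2 - p.1 > 1)))
            (fun p hp => hsegmap p hp)
          rw [hmc, hIH]
          simp [hpe]
        · simp only [List.filter_cons]
          have hcnd : ((k : Int) - (-1) > 1) := by
            have : 0 < pre.length := hprelen.mpr hpe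
            omega
          rw [if_pos (by simpa using hcnd)]
          simp only [List.map_cons]
          have hseg0 : segOut (pre ++ 0 :: suf) (-1) k = fseg pre := by
            have hsl : PySem.List.slice (pre ++ 0 :: suf) none (some k) = pre := by
              rw [hk, PySem.List.slice_to_natCast]
              simp
            simp [segOut, hsl, fseg, negCount]
          rw [hseg0, hfilter_shift, List.map_map]
          have hmc := List.map_congr_left
            (f := (fun p => segOut (pre ++ 0 :: suf) p.1 p.2) ∘ (fun p => (p.1 + (k + 1), p.2 + (k + 1))))
            (g := fun p => segOut suf p.1 p.2)
            (l := ((zeroCuts suf).zip (zeroCuts suf).tail).filter (fun p => decide (p.2 - p.1 > 1)))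
            (fun p hp => hsegmap p hp)
          rw [hmc, hIH]
          simp [hpe]
      · -- no zero at all
        have hnz : ∀ x ∈ nums, x ≠ 0 := fun x hx h => hz (h ▸ hx)
        have hcuts : zeroCuts nums = [-1, (nums.length : Int)] := by
          rw [zeroCuts_eq, zI_nozero nums hnz 0]; simp
        rw [hcuts, bSplit_nozero nums [] hnz]
        by_cases hne : nums = []
        · subst hne; simp
        · have hpos : 0 < nums.length := List.length_pos_of_ne_nil hne
          have hcnd : ((nums.length : Int) - (-1) > 1) := by omega
          simp only [List.tail_cons, List.zip_cons_cons, List.zip_nil_right,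
            List.filter_cons, List.filter_nil]
          rw [if_pos (by simpa using hcnd)]
          have hseg : segOut nums (-1) (nums.length : Int) = fseg nums := by
            have hsl : PySem.List.slice nums none (some (nums.length : Int)) = nums := by
              rw [PySem.List.slice_to_natCast]
              simp
            simp [segOut, hsl, fseg, negCount]
          simp [hseg, hne]

-- ===== VERDICT (by name: the statement is the Claim_ definition above) =====
theorem returnMultipleArrays_spec : Claim_equal_returnMultipleArrays := by
  intro nums _
  unfold Spec_returnMultipleArrays returnMultipleArrays returnMultipleArrays_alt
  have h0 : negCount ([] : List Int) = 0 := by simp [negCount]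
  rw [← h0, aLoop_eq]
  rw [foldlSeg]
  simp only [List.nil_append]
  exact (main_eq nums.length nums rfl).symm
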